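-- pv_equiv track=rewrite | github.com/ajesh-mishra/python_leetcode | lc_830_positions_of_large_groups.py | large_group_positions_1
-- ===== SOURCE A (Python) =====
-- def large_group_positions_1(s: str) -> list[list[int]]:
--     start, prev, result = 0, '', []
--
--     for i, c in enumerate(s):
--         if i == 0 or c == prev:
--             prev = c
--             continue
--         if i - 1 - start > 1:
--             result.append([start, i - 1])
--         start = i
--         prev = c
--
--     if len(s) - 1 - start > 1:
--         result.append([start, len(s) - 1])
--
--     return result
-- ===== SOURCE B (Python) =====
-- def large_group_positions_1(s: str) -> list[list[int]]:
--     result = []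
--     i, n = 0, len(s)
--     while i < n:
--         j = i
--         while j < n and s[j] == s[i]:
--             j += 1
--         if j - i >= 3:
--             result.append([i, j - 1])
--         i = j
--     return result
-- ===== Notes on version B (the rewrite author's own statement) =====
-- stated objective: alternative
-- what changed: Replaced the per-character state machine (start/prev bookkeeping with a trailing flush) by a run-oriented two-pointer scan: an outer loop per maximal run, an inner loop finding the run's end, no carried prev state and no post-loop flush.
import Mathlib
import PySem

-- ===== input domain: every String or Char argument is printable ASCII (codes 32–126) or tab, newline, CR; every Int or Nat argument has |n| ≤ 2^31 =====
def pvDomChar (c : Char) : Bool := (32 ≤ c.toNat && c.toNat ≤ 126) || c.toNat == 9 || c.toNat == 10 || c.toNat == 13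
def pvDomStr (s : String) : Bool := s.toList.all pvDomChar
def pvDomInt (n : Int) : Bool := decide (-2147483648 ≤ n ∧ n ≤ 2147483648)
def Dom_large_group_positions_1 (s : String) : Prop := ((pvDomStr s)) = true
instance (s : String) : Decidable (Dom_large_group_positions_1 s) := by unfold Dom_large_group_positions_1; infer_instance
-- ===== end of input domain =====

-- B replaces A's per-character state machine (start/prev bookkeeping + trailing flush) by a
-- run-oriented two-pointer scan over maximal runs; same O(n) cost (objective: alternative).

-- ===== PORT A =====
-- A's for-loop over enumerate(s): structural recursion carrying the index i and the
-- state (start, prev, result); prev is a Python string ('' initially, then the 1-char string c).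
def lgpLoopA : List Char → Int → Int × String × List (List Int) → Int × String × List (List Int)
  | [], _, st => st
  | c :: rest, i, (start, prev, result) =>
    if i == 0 || String.ofList [c] == prev then
      lgpLoopA rest (i + 1) (start, String.ofList [c], result)
    else
      let result' := if i - 1 - start > 1 then result ++ [[start, i - 1]] else result
      lgpLoopA rest (i + 1) (i, String.ofList [c], result')

def large_group_positions_1 (s : String) : List (List Int) :=
  let st := lgpLoopA s.toList 0 (0, "", [])
  if PySem.Str.len s - 1 - st.1 > 1 then st.2.2 ++ [[st.1, PySem.Str.len s - 1]]
  else st.2.2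

-- ===== PORT B =====
-- B's outer while-loop: one step per maximal run starting at index i with head character c;
-- the inner while-loop advancing j past equal characters is the takeWhile/dropWhile of c.
def lgpRunsB : List Char → Int → List (List Int)
  | [], _ => []
  | c :: rest, i =>
    let len : Int := (rest.takeWhile (· == c)).length + 1
    (if len ≥ 3 then [[i, i + len - 1]] else []) ++
      lgpRunsB (rest.dropWhile (· == c)) (i + len)
termination_by cs _ => cs.length
decreasing_by
  simpa using Nat.lt_succ_of_le (List.length_dropWhile_le _ _)

def large_group_positions_1_alt (s : String) : List (List Int) :=
  lgpRunsB s.toList 0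

-- ===== PRECONDITION & SPEC =====
def Spec_large_group_positions_1 (s : String) (out : List (List Int)) : Prop := out = large_group_positions_1_alt s
instance (s : String) (out : List (List Int)) : Decidable (Spec_large_group_positions_1 s out) := by unfold Spec_large_group_positions_1; infer_instance

-- ===== CLAIM (what is proved, stated in full; the proofs are below) =====
def Claim_equal_large_group_positions_1 : Prop := ∀ (s : String), Dom_large_group_positions_1 s → Spec_large_group_positions_1 s (large_group_positions_1 s)

-- ===== LEMMAS AND PROOFS =====

theorem lgp_ofList_beq (c c' : Char) : (String.ofList [c'] == String.ofList [c]) = (c' == c) := by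
  by_cases h : c' = c
  · simp [h]
  · simp [String.ofList_inj, h]

-- Invariant lemma: entering A's loop at index i (1 ≤ i) with prev = the one-char string of the
-- current run's character c, start the run's start index and acc the output so far, A's loop
-- followed by the trailing flush (at total length i + cs.length) produces acc followed by B's
-- run-scan output for the tail, where the current run already holds i - start consumed characters.
theorem lgp_loop_eq_runs (cs : List Char) : ∀ (c : Char) (i start : Int) (acc : List (List Int)),
    1 ≤ i →
    (if (i + (cs.length : Int)) - 1 - (lgpLoopA cs i (start, String.ofList [c], acc)).1 > 1
     then (lgpLoopA cs i (start, String.ofList [c], acc)).2.2 ++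
       [[(lgpLoopA cs i (start, String.ofList [c], acc)).1, (i + (cs.length : Int)) - 1]]
     else (lgpLoopA cs i (start, String.ofList [c], acc)).2.2)
      = acc ++
        ((if (i - start) + ((cs.takeWhile (· == c)).length : Int) ≥ 3
          then [[start, start + ((i - start) + ((cs.takeWhile (· == c)).length : Int)) - 1]]
          else []) ++
          lgpRunsB (cs.dropWhile (· == c))
            (start + ((i - start) + ((cs.takeWhile (· == c)).length : Int)))) := by
  induction cs with
  | nil =>
    intro c i start acc hi
    simp only [lgpLoopA, List.takeWhile_nil, List.dropWhile_nil, List.length_nil,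
      Int.natCast_zero, lgpRunsB, List.append_nil]
    by_cases h : i - 1 - start > 1
    · rw [if_pos (by omega), if_pos (by omega)]
      have e1 : start + (i - start + 0) - 1 = i - 1 := by omega
      have e2 : (i : Int) + 0 - 1 = i - 1 := by omega
      rw [e1, e2]
    · rw [if_neg (by omega), if_neg (by omega), List.append_nil]
  | cons c' cs' ih =>
    intro c i start acc hi
    have hine : (i == 0) = false := by simp [beq_eq_false_iff_ne]; omega
    by_cases hc : c' = c
    · subst hc
      simp only [lgpLoopA, hine, BEq.rfl, Bool.false_or, if_true]
      have key := ih c' (i + 1) start acc (by omega)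
      simp only [List.takeWhile_cons_of_pos (a := c') (p := (· == c')) (by simp),
        List.dropWhile_cons_of_pos (a := c') (p := (· == c')) (by simp),
        List.length_cons] at key ⊢
      have e1 : (i : Int) + (((cs'.takeWhile (· == c')).length + 1 : Nat) : Int) - start
          = (i + 1 - start) + ((cs'.takeWhile (· == c')).length : Int) := by omega
      have e2 : (i - start) + (((cs'.takeWhile (· == c')).length + 1 : Nat) : Int)
          = (i + 1 - start) + ((cs'.takeWhile (· == c')).length : Int) := by omega
      have e3 : (i : Int) + ((cs'.length + 1 : Nat) : Int)
          = (i + 1) + (cs'.length : Int) := by omega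
      rw [e2, e3]
      exact key
    · have hbeq : (c' == c) = false := by simp [hc]
      simp only [lgpLoopA, hine, lgp_ofList_beq, hbeq, Bool.false_or, Bool.false_eq_true, if_false]
      have key := ih c' (i + 1) i (if i - 1 - start > 1 then acc ++ [[start, i - 1]] else acc)
        (by omega)
      simp only [List.takeWhile_cons_of_neg (a := c') (p := (· == c)) (by simp [hc]),
        List.dropWhile_cons_of_neg (a := c') (p := (· == c)) (by simp [hc]),
        List.length_nil, Int.natCast_zero, List.length_cons]
      have e3 : (i : Int) + ((cs'.length + 1 : Nat) : Int)
          = (i + 1) + (cs'.length : Int) := by omega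
      rw [e3, key]
      -- unfold one step of B on the new run starting at i
      conv_rhs => rw [lgpRunsB]
      have e4 : start + (i - start + 0) = i := by omega
      have e5 : (i + 1 - i) + ((cs'.takeWhile (· == c')).length : Int)
          = ((cs'.takeWhile (· == c')).length : Int) + 1 := by ring
      rw [e4, e5]
      by_cases h : i - 1 - start > 1
      · rw [if_pos h, if_pos (by omega : (i - start) + (0:Int) ≥ 3), List.append_assoc]
      · rw [if_neg h, if_neg (by omega : ¬ ((i - start) + (0:Int) ≥ 3)), List.nil_append]

-- ===== VERDICT (by name: the statement is the Claim_ definition above) =====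
theorem large_group_positions_1_spec : Claim_equal_large_group_positions_1 := by
  intro s _
  unfold Spec_large_group_positions_1 large_group_positions_1 large_group_positions_1_alt
  have hlen : PySem.Str.len s = (s.toList.length : Int) := by simp
  rw [hlen]
  cases hs : s.toList with
  | nil => simp [lgpLoopA, lgpRunsB]
  | cons c cs =>
    have h0 : lgpLoopA (c :: cs) 0 (0, "", []) = lgpLoopA cs 1 (0, String.ofList [c], []) := by
      simp [lgpLoopA]
    rw [h0]
    have key := lgp_loop_eq_runs cs c 1 0 [] (by omega)
    simp only [List.length_cons]
    have e3 : (((cs.length + 1 : Nat)) : Int) = 1 + (cs.length : Int) := by omega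
    rw [e3, key]
    conv_rhs => rw [lgpRunsB]
    simp only [List.nil_append, zero_add]
    have e1 : (1 : Int) - 0 + ((cs.takeWhile (· == c)).length : Int)
        = ((cs.takeWhile (· == c)).length : Int) + 1 := by ring
    rw [e1]
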